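-- pv_equiv track=rewrite | github.com/rppavan/chatbot | src/backends/clickpost_client.py | get_clickpost_carrier_id
-- ===== SOURCE A (Python) =====
-- CARRIER_MAPPING: dict[str, int] = {
--     "aramex int": 2,
--     "aramex": 2,
--     "ecomexpress": 3,
--     "ecom express": 3,
--     "delhivery": 4,
--     "bluedart": 5,
--     "blue dart": 5,
--     "xpressbees": 6,
--     "xpress bees": 6,
--     "dtdc": 8,
--     "blitz": 207,
--     "grow simplee": 207,
--     "shadowfax reverse": 11,
--     "proship b2c reverse": 367,
--     "delhivery reverse": 25,
--     "proship b2c": 329,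
--     "proship": 329,
--     "shadowfax": 9,
--     "ecomexpress reverse": 24,
--     "ecom express reverse": 24,
--     "ekart": 55,
--     "ekart logistics": 55,
--     "fedex": 1,
--     "fedex india": 1,
-- }
--
-- def get_clickpost_carrier_id(company_name: str) -> int | None:
--     """
--     Map a Shopify shipping company name to a Clickpost cp_id.
--     Port of getClickpostCarrierId() from carrier-mapping.ts.
--
--     Lookup order:
--     1. Exact match (normalized)
--     2. Longest substring of company_name that matches a key
--     3. Any key that is a substring of company_name (reverse fallback)
--     """
--     if not company_name:
--         return None
--
--     normalized = company_name.lower().strip()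
--
--     # Exact match
--     if normalized in CARRIER_MAPPING:
--         return CARRIER_MAPPING[normalized]
--
--     # Longest key that is a substring of the company name
--     longest_key: str | None = None
--     for key in CARRIER_MAPPING:
--         if key in normalized:
--             if longest_key is None or len(key) > len(longest_key):
--                 longest_key = key
--     if longest_key:
--         return CARRIER_MAPPING[longest_key]
--
--     # Reverse: company name as substring of a key
--     for key, value in CARRIER_MAPPING.items():
--         if normalized in key:
--             return value
--
--     return None
-- ===== SOURCE B (Python) =====
-- CARRIER_MAPPING: dict[str, int] = {
--     "aramex int": 2,
--     "aramex": 2,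
--     "ecomexpress": 3,
--     "ecom express": 3,
--     "delhivery": 4,
--     "bluedart": 5,
--     "blue dart": 5,
--     "xpressbees": 6,
--     "xpress bees": 6,
--     "dtdc": 8,
--     "blitz": 207,
--     "grow simplee": 207,
--     "shadowfax reverse": 11,
--     "proship b2c reverse": 367,
--     "delhivery reverse": 25,
--     "proship b2c": 329,
--     "proship": 329,
--     "shadowfax": 9,
--     "ecomexpress reverse": 24,
--     "ecom express reverse": 24,
--     "ekart": 55,
--     "ekart logistics": 55,
--     "fedex": 1,
--     "fedex india": 1,
-- }
--
-- # Keys pre-sorted by descending length with a STABLE sort (ties keep insertion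
-- # order).  Scanning this list and taking the first key that is a substring of
-- # the normalized name subsumes both A's exact-match phase (an exact key is the
-- # unique maximal-length substring key) and A's longest-substring argmax scan.
-- _KEYS_BY_LEN = sorted(CARRIER_MAPPING, key=len, reverse=True)
--
--
-- def get_clickpost_carrier_id(company_name: str) -> int | None:
--     if not company_name:
--         return None
--     normalized = company_name.lower().strip()
--     for key in _KEYS_BY_LEN:
--         if key in normalized:
--             return CARRIER_MAPPING[key]
--     for key, value in CARRIER_MAPPING.items():
--         if normalized in key:
--             return value
--     return None
-- ===== Notes on version B (the rewrite author's own statement) =====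
-- stated objective: simpler
-- what changed: A's exact-match lookup plus running-argmax scan for the longest substring key are replaced by a precomputed key list stably sorted by descending length, scanned once for the first substring hit (sort-then-first-match instead of argmax-with-accumulator); the reverse fallback is kept.
import Mathlib
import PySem

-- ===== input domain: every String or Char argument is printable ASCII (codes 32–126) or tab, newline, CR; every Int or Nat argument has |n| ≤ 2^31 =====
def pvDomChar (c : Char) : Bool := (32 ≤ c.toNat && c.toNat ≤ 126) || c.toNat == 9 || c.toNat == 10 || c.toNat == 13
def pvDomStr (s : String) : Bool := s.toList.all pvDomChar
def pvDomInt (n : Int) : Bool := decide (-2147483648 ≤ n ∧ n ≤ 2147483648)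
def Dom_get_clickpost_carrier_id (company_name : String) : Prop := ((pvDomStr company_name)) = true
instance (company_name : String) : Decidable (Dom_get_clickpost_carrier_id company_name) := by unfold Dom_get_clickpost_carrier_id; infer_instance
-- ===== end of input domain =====

-- B replaces A's exact-match phase and running-argmax longest-substring scan by a key list
-- stably pre-sorted by descending length, scanned once for the first substring hit, keeping
-- A's reverse fallback (objective: simpler; no speed claim).

-- the module constant CARRIER_MAPPING (a dict literal; keys distinct)
def pvM : PySem.Dict String Int := PySem.Dict.mk
  [("aramex int", 2), ("aramex", 2), ("ecomexpress", 3), ("ecom express", 3),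
   ("delhivery", 4), ("bluedart", 5), ("blue dart", 5), ("xpressbees", 6),
   ("xpress bees", 6), ("dtdc", 8), ("blitz", 207), ("grow simplee", 207),
   ("shadowfax reverse", 11), ("proship b2c reverse", 367), ("delhivery reverse", 25),
   ("proship b2c", 329), ("proship", 329), ("shadowfax", 9), ("ecomexpress reverse", 24),
   ("ecom express reverse", 24), ("ekart", 55), ("ekart logistics", 55),
   ("fedex", 1), ("fedex india", 1)]

-- ===== PORT A =====
-- loop body of A's "longest key that is a substring" scan
def pvAstep (n : String) (acc : Option String) (key : String) : Option String :=
  if PySem.Str.isIn key n then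
    match acc with
    | none => some key
    | some l => if PySem.Str.len key > PySem.Str.len l then some key else acc
  else acc

-- body of A after the normalization, on the normalized string n
def pvCoreA (n : String) : Option Int :=
  match PySem.Dict.get? pvM n with          -- exact match
  | some v => some v
  | none =>
    match (PySem.Dict.keys pvM).foldl (pvAstep n) none with
    | some k => PySem.Dict.get? pvM k       -- CARRIER_MAPPING[longest_key] (key present; keys are nonempty so truthiness = isSome)
    | none =>                               -- reverse fallback: first key containing n
      ((PySem.Dict.items pvM).find? (fun p => PySem.Str.isIn n p.1)).map Prod.snd

def get_clickpost_carrier_id (company_name : String) : Option Int :=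
  if company_name = "" then none            -- `if not company_name`
  else pvCoreA (PySem.Str.strip (PySem.Str.lower company_name))

-- ===== PORT B =====
-- _KEYS_BY_LEN = sorted(CARRIER_MAPPING, key=len, reverse=True), a module-level constant
def pvSortedKeys : List String :=
  PySem.List.sorted (PySem.Dict.keys pvM) (fun k => PySem.Str.len k) true

-- body of B after the normalization: first sorted key that is a substring, else fallback
def pvCoreB (n : String) : Option Int :=
  match pvSortedKeys.find? (fun k => PySem.Str.isIn k n) with
  | some k => PySem.Dict.get? pvM k         -- return CARRIER_MAPPING[key]
  | none =>                                 -- reverse fallback loop, as in A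
    ((PySem.Dict.items pvM).find? (fun p => PySem.Str.isIn n p.1)).map Prod.snd

def get_clickpost_carrier_id_alt (company_name : String) : Option Int :=
  if company_name = "" then none
  else pvCoreB (PySem.Str.strip (PySem.Str.lower company_name))

-- ===== PRECONDITION & SPEC =====
def Spec_get_clickpost_carrier_id (company_name : String) (out : Option Int) : Prop := out = get_clickpost_carrier_id_alt company_name
instance (company_name : String) (out : Option Int) : Decidable (Spec_get_clickpost_carrier_id company_name out) := by unfold Spec_get_clickpost_carrier_id; infer_instance

-- ===== CLAIM =====
def Claim_equal_get_clickpost_carrier_id : Prop := ∀ (company_name : String), Dom_get_clickpost_carrier_id company_name → Spec_get_clickpost_carrier_id company_name (get_clickpost_carrier_id company_name)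

-- ===== LEMMAS AND PROOFS =====

-- stable descending insertion (insert after all elements of length ≥ len k)
def pvIns (k : String) : List String → List String
  | [] => [k]
  | x :: xs => if PySem.Str.len k ≤ PySem.Str.len x then x :: pvIns k xs else k :: x :: xs

-- descending-by-length order along a list
def pvDesc (S : List String) : Prop :=
  S.Pairwise (fun a b => PySem.Str.len b ≤ PySem.Str.len a)

lemma pvIns_mem {y k : String} {S : List String} (hy : y ∈ pvIns k S) : y = k ∨ y ∈ S := by
  induction S with
  | nil => simpa [pvIns] using hy
  | cons x xs ih =>
    unfold pvIns at hy
    split at hy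
    · rcases List.mem_cons.mp hy with rfl | hy'
      · exact Or.inr (List.mem_cons_self ..)
      · rcases ih hy' with h1 | h2
        · exact Or.inl h1
        · exact Or.inr (List.mem_cons_of_mem _ h2)
    · rcases List.mem_cons.mp hy with rfl | hy'
      · exact Or.inl rfl
      · exact Or.inr hy'

lemma pvIns_desc (k : String) (S : List String) (h : pvDesc S) : pvDesc (pvIns k S) := by
  induction S with
  | nil => exact List.pairwise_singleton _ _
  | cons x xs ih =>
    rcases List.pairwise_cons.mp h with ⟨hx, hxs⟩
    unfold pvIns
    by_cases hle : PySem.Str.len k ≤ PySem.Str.len x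
    · rw [if_pos hle]
      refine List.pairwise_cons.mpr ⟨?_, ih hxs⟩
      intro y hy
      rcases pvIns_mem hy with rfl | hy'
      · exact hle
      · exact hx y hy'
    · rw [if_neg hle]
      rw [not_le] at hle
      refine List.pairwise_cons.mpr ⟨?_, h⟩
      intro y hy
      rcases List.mem_cons.mp hy with rfl | hy'
      · exact le_of_lt hle
      · exact le_trans (hx y hy') (le_of_lt hle)

-- key step: inserting k into a descending list commutes find? with A's argmax step
lemma pvStep (n k : String) (S : List String) (h : pvDesc S) :
    (pvIns k S).find? (fun j => PySem.Str.isIn j n)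
      = pvAstep n (S.find? (fun j => PySem.Str.isIn j n)) k := by
  induction S with
  | nil =>
    cases hk : PySem.Str.isIn k n <;> simp [pvIns, pvAstep]
  | cons x xs ih =>
    rcases List.pairwise_cons.mp h with ⟨hx, hxs⟩
    unfold pvIns
    by_cases hle : PySem.Str.len k ≤ PySem.Str.len x
    · rw [if_pos hle, List.find?_cons, List.find?_cons]
      cases hpx : PySem.Str.isIn x n with
      | true =>
        cases hk : PySem.Str.isIn k n with
        | true =>
          simp only [pvAstep, hk, if_true]
          rw [if_neg (by omega : ¬ PySem.Str.len k > PySem.Str.len x)]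
        | false => simp only [pvAstep, hk, Bool.false_eq_true, if_false]
      | false =>
        exact ih hxs
    · rw [if_neg hle]
      rw [not_le] at hle
      rw [List.find?_cons]
      cases hk : PySem.Str.isIn k n with
      | true =>
        cases hf : (x :: xs).find? (fun j => PySem.Str.isIn j n) with
        | none => simp only [pvAstep, hk, if_true]
        | some y =>
          have hy : y ∈ x :: xs := List.mem_of_find?_eq_some hf
          have hylen : PySem.Str.len y ≤ PySem.Str.len x := by
            rcases List.mem_cons.mp hy with rfl | hy'
            · exact le_refl _
            · exact hx y hy'
          simp only [pvAstep, hk, if_true]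
          rw [if_pos (by omega : PySem.Str.len k > PySem.Str.len y)]
      | false =>
        simp only [pvAstep, hk, Bool.false_eq_true, if_false]

-- A's whole fold over any key list = find? over the insertion-sorted list
lemma pvFoldEq (n : String) :
    ∀ (L : List String) (S : List String), pvDesc S →
    L.foldl (pvAstep n) (S.find? (fun j => PySem.Str.isIn j n))
      = (L.foldl (fun s k => pvIns k s) S).find? (fun j => PySem.Str.isIn j n) := by
  intro L
  induction L with
  | nil => intro S _; rfl
  | cons k t ih =>
    intro S hS
    simp only [List.foldl_cons]
    rw [← pvStep n k S hS]
    exact ih (pvIns k S) (pvIns_desc k S hS)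

-- Python's stable descending sort of the concrete key list IS the insertion-sorted list
lemma pvSorted_concrete :
    (PySem.Dict.keys pvM).foldl (fun s k => pvIns k s) [] = pvSortedKeys := by decide

lemma pvFold_find (n : String) :
    (PySem.Dict.keys pvM).foldl (pvAstep n) none
      = pvSortedKeys.find? (fun j => PySem.Str.isIn j n) := by
  have h := pvFoldEq n (PySem.Dict.keys pvM) [] (List.Pairwise.nil)
  simpa [pvSorted_concrete] using h

set_option maxRecDepth 40000 in
lemma pvCore_eq (n : String) : pvCoreA n = pvCoreB n := by
  by_cases h : PySem.Dict.get? pvM n = none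
  · unfold pvCoreA pvCoreB
    rw [h, pvFold_find]
  · -- n is one of the 24 literal keys: decide each case
    have hmem : n ∈ PySem.Dict.keys pvM := by
      by_contra hm
      exact h ((PySem.Dict.get?_eq_none_iff_not_mem_keys pvM n).mpr hm)
    simp only [pvM, PySem.Dict.keys_mk, List.map_cons, List.map_nil, List.mem_cons,
      List.not_mem_nil, or_false] at hmem
    rcases hmem with rfl|rfl|rfl|rfl|rfl|rfl|rfl|rfl|rfl|rfl|rfl|rfl|rfl|rfl|rfl|rfl|rfl|rfl|rfl|rfl|rfl|rfl|rfl|rfl <;> decide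

-- ===== VERDICT =====
theorem get_clickpost_carrier_id_spec : Claim_equal_get_clickpost_carrier_id := by
  intro s _
  unfold Spec_get_clickpost_carrier_id get_clickpost_carrier_id get_clickpost_carrier_id_alt
  split
  · rfl
  · exact pvCore_eq _
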